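-- pv_equiv track=rewrite | github.com/sciunto-org/python-bibtexparser | bibtexparser/author_parse.py | firstislower
-- ===== SOURCE A (Python) =====
-- def firstislower(s):
--     """
--     an islower() function that finds if th first letter is lower case,
--     ignoring TeX control sequences
--
--     used to find "von" parts of names
--     """
--     ind = 0
--     in_control = False
--     for c in s:
--         if c == "{":
--             ind += 1
--             in_control = False
--         elif c == "\\":
--             ind += 1
--             in_control = True
--         else:
--             if not in_control:
--                 return c.islower()
--     return False
-- ===== SOURCE B (Python) =====
-- def firstislower(s):
--     i = 0
--     n = len(s)
--     while i < n:
--         c = s[i]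
--         if c == "{":
--             i += 1
--         elif c == "\\":
--             i += 1
--             while i < n and s[i] != "{":
--                 i += 1
--         else:
--             return c.islower()
--     return False
-- ===== Notes on version B (the rewrite author's own statement) =====
-- stated objective: simpler
-- what changed: Replaces the in_control flag and dead ind counter with an index-based loop whose inner while skips a TeX control sequence up to (not past) the next opening brace.
import Mathlib
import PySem

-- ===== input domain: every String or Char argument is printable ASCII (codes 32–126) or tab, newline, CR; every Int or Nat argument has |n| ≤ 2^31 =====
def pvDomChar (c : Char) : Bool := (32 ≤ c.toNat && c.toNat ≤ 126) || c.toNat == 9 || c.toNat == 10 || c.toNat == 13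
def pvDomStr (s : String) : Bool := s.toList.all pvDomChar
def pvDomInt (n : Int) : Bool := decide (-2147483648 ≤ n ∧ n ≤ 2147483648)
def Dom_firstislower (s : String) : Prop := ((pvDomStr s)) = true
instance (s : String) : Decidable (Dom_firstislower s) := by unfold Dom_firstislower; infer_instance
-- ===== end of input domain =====

-- B replaces A's in_control flag (and dead ind counter) with a nested skip loop; objective: simpler.

-- ===== PORT A =====
-- the for-loop over s with the in_control flag (ind is dead state and is kept for faithfulness)
def firstislowerLoopA : List Char → Int → Bool → Bool
  | [], _, _ => false
  | c :: rest, ind, in_control =>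
    if c = '{' then firstislowerLoopA rest (ind + 1) false
    else if c = '\\' then firstislowerLoopA rest (ind + 1) true
    else if in_control then firstislowerLoopA rest ind in_control
    else PySem.Chars.islower c

def firstislower (s : String) : Bool := firstislowerLoopA s.toList 0 false

-- ===== PORT B =====
-- inner `while i < n and s[i] != '{': i += 1`: advance past chars up to (not past) the next '{'
def skipControlB : List Char → List Char
  | [] => []
  | c :: rest => if c ≠ '{' then skipControlB rest else c :: rest

theorem skipControlB_length_le (l : List Char) : (skipControlB l).length ≤ l.length := by
  induction l with
  | nil => simp [skipControlB]
  | cons c rest ih =>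
    simp only [skipControlB]
    split
    · exact Nat.le_trans ih (Nat.le_succ _)
    · exact Nat.le_refl _

-- outer `while i < n` loop
def firstislowerLoopB : List Char → Bool
  | [] => false
  | c :: rest =>
    if c = '{' then firstislowerLoopB rest
    else if c = '\\' then firstislowerLoopB (skipControlB rest)
    else PySem.Chars.islower c
termination_by l => l.length
decreasing_by
  · simp
  · exact Nat.lt_succ_of_le (skipControlB_length_le rest)

def firstislower_alt (s : String) : Bool := firstislowerLoopB s.toList

-- ===== PRECONDITION & SPEC =====
def Spec_firstislower (s : String) (out : Bool) : Prop := out = firstislower_alt s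
instance (s : String) (out : Bool) : Decidable (Spec_firstislower s out) := by unfold Spec_firstislower; infer_instance

-- ===== CLAIM (what is proved, stated in full; the proofs are below) =====
def Claim_equal_firstislower : Prop := ∀ (s : String), Dom_firstislower s → Spec_firstislower s (firstislower s)

-- ===== LEMMAS AND PROOFS =====

-- A's loop ignores the dead ind counter
theorem loopA_ind_irrel (l : List Char) (i j : Int) (b : Bool) :
    firstislowerLoopA l i b = firstislowerLoopA l j b := by
  induction l generalizing i j b with
  | nil => rfl
  | cons c rest ih =>
    simp only [firstislowerLoopA]
    split_ifs <;> first | apply ih | rfl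

-- in control, A's loop scans to the next '{' — i.e. behaves like B continued from skipControlB
theorem loopA_true_skip (l : List Char) (i : Int) :
    firstislowerLoopA l i true = firstislowerLoopA (skipControlB l) i true := by
  induction l generalizing i with
  | nil => rfl
  | cons c rest ih =>
    by_cases h : c = '{'
    · simp [skipControlB, h]
    · by_cases hb : c = '\\'
      · subst hb
        simp only [skipControlB, firstislowerLoopA, ne_eq, h, not_false_iff, if_true]
        rw [if_neg (show ¬ False by simp), ih, loopA_ind_irrel _ (i+1) i]
      · simp [skipControlB, firstislowerLoopA, h, hb]
        exact ih i

theorem skipControlB_cons (l : List Char) (d : Char) (tl : List Char)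
    (hs : skipControlB l = d :: tl) : d = '{' ∧ tl.length < l.length := by
  induction l with
  | nil => simp [skipControlB] at hs
  | cons e tl' ih =>
    simp only [skipControlB] at hs
    split at hs
    · have := ih hs
      exact ⟨this.1, Nat.lt_succ_of_lt this.2⟩
    · rename_i he
      simp at he
      cases hs
      exact ⟨he, Nat.lt_succ_self _⟩

theorem loopA_eq_loopB_aux (n : Nat) : ∀ (l : List Char), l.length ≤ n → ∀ (i : Int),
    firstislowerLoopA l i false = firstislowerLoopB l := by
  induction n with
  | zero =>
    intro l hl i
    have : l = [] := List.eq_nil_of_length_eq_zero (Nat.le_zero.mp hl)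
    subst this
    simp [firstislowerLoopA, firstislowerLoopB]
  | succ n ih =>
    intro l hl i
    cases l with
    | nil => simp [firstislowerLoopA, firstislowerLoopB]
    | cons c rest =>
      simp only [List.length_cons, Nat.succ_le_succ_iff] at hl
      by_cases h : c = '{'
      · simp only [firstislowerLoopA, firstislowerLoopB, h, if_true]
        exact ih rest hl (i + 1)
      · by_cases hb : c = '\\'
        · subst hb
          simp only [firstislowerLoopA, firstislowerLoopB, if_neg h]
          rw [loopA_true_skip]
          cases hs : skipControlB rest with
          | nil => simp [firstislowerLoopA, firstislowerLoopB]
          | cons d tl =>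
            obtain ⟨hd, hlen⟩ := skipControlB_cons rest d tl hs
            subst hd
            simp only [firstislowerLoopA, firstislowerLoopB]
            exact ih tl (Nat.le_of_lt (Nat.lt_of_lt_of_le hlen hl)) (i + 1 + 1)
        · simp [firstislowerLoopA, firstislowerLoopB, h, hb]

-- ===== VERDICT (by name: the statement is the Claim_ definition above) =====
theorem firstislower_spec : Claim_equal_firstislower := by
  intro s _
  unfold Spec_firstislower firstislower firstislower_alt
  exact loopA_eq_loopB_aux _ _ (Nat.le_refl _) 0
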